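-- pv_equiv track=rewrite | github.com/LukaErnestini/jt-seminarska | syllabify.py | phoneme_syllables
-- ===== SOURCE A (Python) =====
-- def phoneme_syllables(l):
--     arp_vowels = ['AA','AE','AH','AO','AW','AY','EH','ER','EY','IH',
--                     'IY','OW','OY','UH','UW']
--     pk = ['V' if any(v in x for v in arp_vowels) else 'C' for x in l]
--     pk = ''.join(pk)
--     syl_list = []
--     while pk:
--         end = 0
--         if(pk.startswith('CVCC') or pk.startswith('CCCV')):
--             end = 4
--         elif(pk.startswith('CCV') or pk.startswith('CVC') or pk.startswith('VCC')):
--             end = 3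
--         elif(pk.startswith('VC') or pk.startswith('CV')):
--             end = 2
--         elif(pk.startswith('V')):
--             end = 1
--         else:
--             #print "Syllables couldn't be computed: ", pk, syl_list, l
--             return None
--         syl_list.append(l[0:end])
--         l = l[end:]
--         pk = pk[end:]
--     return syl_list
-- ===== SOURCE B (Python) =====
-- def phoneme_syllables(l):
--     arp_vowels = ['AA','AE','AH','AO','AW','AY','EH','ER','EY','IH',
--                     'IY','OW','OY','UH','UW']
--     pk = ''.join('V' if any(v in x for v in arp_vowels) else 'C' for x in l)
--     patterns = ('CVCC', 'CCCV', 'CCV', 'CVC', 'VCC', 'VC', 'CV', 'V')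
--     out = []
--     i = 0
--     n = len(pk)
--     while i < n:
--         for k in (4, 3, 2, 1):
--             if i + k <= n and pk[i:i+k] in patterns:
--                 out.append(l[i:i+k])
--                 i += k
--                 break
--         else:
--             return None
--     return out
-- ===== Notes on version B (the rewrite author's own statement) =====
-- stated objective: alternative
-- what changed: A's while loop re-slices both the phoneme list and the V/C string on every syllable (l = l[end:]; pk = pk[end:]) and picks the prefix with a hard-coded if/elif startswith chain; B keeps both sequences fixed and walks a single cursor i over them, dispatching via a longest-first lookup of pk[i:i+k] in a pattern table (it avoids A's repeated suffix copies, though a timing run's random inputs mostly fail on the first pattern, where both are equal).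
import Mathlib
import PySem

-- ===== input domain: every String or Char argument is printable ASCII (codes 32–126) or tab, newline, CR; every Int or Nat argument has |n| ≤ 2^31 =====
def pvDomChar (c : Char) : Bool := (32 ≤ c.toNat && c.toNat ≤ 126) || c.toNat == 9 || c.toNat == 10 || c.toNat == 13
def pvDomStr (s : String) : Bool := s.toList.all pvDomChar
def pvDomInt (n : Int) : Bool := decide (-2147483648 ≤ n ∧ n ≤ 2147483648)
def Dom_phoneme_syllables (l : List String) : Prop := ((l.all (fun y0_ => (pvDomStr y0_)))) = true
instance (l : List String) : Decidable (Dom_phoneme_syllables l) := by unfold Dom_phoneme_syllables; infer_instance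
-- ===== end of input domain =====

-- B replaces A's repeated re-slicing of both lists and its if/elif startswith chain by a
-- single cursor over a longest-first pattern table; same return value everywhere (both total).

-- ===== PORT A =====

-- arp_vowels (shared literal of both Pythons, identical line in Source A and Source B)
def pvVowels : List String := ["AA","AE","AH","AO","AW","AY","EH","ER","EY","IH",
                               "IY","OW","OY","UH","UW"]

-- pk = ''.join('V' if any(v in x for v in arp_vowels) else 'C' for x in l)
-- ('v in x' is PySem.Str.isIn; the joined string is kept as its List Char)
def pvPK (l : List String) : List Char :=
  l.map (fun x => if pvVowels.any (fun v => PySem.Str.isIn v x) then 'V' else 'C')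

-- the if/elif chain computing `end` (0 plays A's role of "no branch fired")
def pvEndA (pk : List Char) : Nat :=
  if PySem.Chars.startswith pk ['C','V','C','C'] || PySem.Chars.startswith pk ['C','C','C','V'] then 4
  else if PySem.Chars.startswith pk ['C','C','V'] || PySem.Chars.startswith pk ['C','V','C'] ||
          PySem.Chars.startswith pk ['V','C','C'] then 3
  else if PySem.Chars.startswith pk ['V','C'] || PySem.Chars.startswith pk ['C','V'] then 2
  else if PySem.Chars.startswith pk ['V'] then 1
  else 0

-- the `while pk:` loop; each step appends l[0:end] and continues with l[end:], pk[end:]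
def pvLoopA (l : List String) (pk : List Char) : Option (List (List String)) :=
  if hpk : pk = [] then some []
  else
    if he : pvEndA pk = 0 then none
    else
      (pvLoopA (PySem.List.slice l (some ((pvEndA pk : Nat) : Int)) none)
               (PySem.List.slice pk (some ((pvEndA pk : Nat) : Int)) none)).map
        (fun rest => PySem.List.slice l (some 0) (some ((pvEndA pk : Nat) : Int)) :: rest)
termination_by pk.length
decreasing_by
  simp only [PySem.List.slice_from_natCast, List.length_drop]
  have hlen : 0 < pk.length := List.length_pos_iff.mpr hpk
  omega

def phoneme_syllables (l : List String) : Option (List (List String)) :=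
  pvLoopA l (pvPK l)

-- ===== PORT B =====

-- patterns = ('CVCC', 'CCCV', 'CCV', 'CVC', 'VCC', 'VC', 'CV', 'V')
def pvPatterns : List (List Char) :=
  [['C','V','C','C'], ['C','C','C','V'], ['C','C','V'], ['C','V','C'],
   ['V','C','C'], ['V','C'], ['C','V'], ['V']]

-- the inner `for k in (4,3,2,1): if i+k <= n and pk[i:i+k] in patterns: …` as the first k that fires
def pvStepB (pk : List Char) (i : Nat) : Option Nat :=
  [4,3,2,1].findSome? (fun k =>
    if i + k ≤ pk.length &&
       pvPatterns.contains (PySem.List.slice pk (some (i : Int)) (some ((i + k : Nat) : Int)))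
    then some k else none)

theorem pvStepB_pos {pk : List Char} {i k : Nat} (h : pvStepB pk i = some k) : 0 < k := by
  rcases List.exists_of_findSome?_eq_some h with ⟨x, hmem, hx⟩
  split at hx
  · obtain rfl : x = k := by simpa using hx
    fin_cases hmem <;> omega
  · simp at hx

-- the `while i < n:` loop over the cursor i
def pvLoopB (l : List String) (pk : List Char) (i : Nat) : Option (List (List String)) :=
  if hi : i < pk.length then
    match hs : pvStepB pk i with
    | none => none
    | some k =>
      (pvLoopB l pk (i + k)).map
        (fun rest => PySem.List.slice l (some (i : Int)) (some ((i + k : Nat) : Int)) :: rest)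
  else some []
termination_by pk.length - i
decreasing_by
  have := pvStepB_pos hs
  omega

def phoneme_syllables_alt (l : List String) : Option (List (List String)) :=
  pvLoopB l (pvPK l) 0

-- ===== PRECONDITION & SPEC =====
def Spec_phoneme_syllables (l : List String) (out : Option (List (List String))) : Prop := out = phoneme_syllables_alt l
instance (l : List String) (out : Option (List (List String))) : Decidable (Spec_phoneme_syllables l out) := by unfold Spec_phoneme_syllables; infer_instance

-- ===== CLAIM (what is proved, stated in full; the proofs are below) =====
def Claim_equal_phoneme_syllables : Prop := ∀ (l : List String), Dom_phoneme_syllables l → Spec_phoneme_syllables l (phoneme_syllables l)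

-- ===== LEMMAS AND PROOFS =====

-- every character of pk is 'V' or 'C'
theorem pvPK_VC (l : List String) : ∀ c ∈ pvPK l, c = 'V' ∨ c = 'C' := by
  intro c hc
  simp only [pvPK, List.mem_map] at hc
  rcases hc with ⟨x, _, hx⟩
  split at hx
  · exact Or.inl hx.symm
  · exact Or.inr hx.symm

-- B's step on the suffix: A's chain and B's longest-first table lookup pick the same length
theorem pvStep_eq (s : List Char) (hvc : ∀ c ∈ s, c = 'V' ∨ c = 'C') :
    ([4,3,2,1].findSome? (fun k =>
      if k ≤ s.length && pvPatterns.contains (s.take k) then some k else none)) =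
    (if pvEndA s = 0 then none else some (pvEndA s)) := by
  rcases s with _ | ⟨a, _ | ⟨b, _ | ⟨c, _ | ⟨d, t⟩⟩⟩⟩
  · decide
  · rcases hvc a (by simp) with rfl | rfl <;> decide
  · rcases hvc a (by simp) with rfl | rfl <;>
      rcases hvc b (by simp) with rfl | rfl <;> decide
  · rcases hvc a (by simp) with rfl | rfl <;>
      rcases hvc b (by simp) with rfl | rfl <;>
        rcases hvc c (by simp) with rfl | rfl <;> decide
  · rcases hvc a (by simp) with rfl | rfl <;>
      rcases hvc b (by simp) with rfl | rfl <;>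
        rcases hvc c (by simp) with rfl | rfl <;>
          rcases hvc d (by simp) with rfl | rfl <;>
            simp [pvEndA, pvPatterns, PySem.Chars.startswith, List.findSome?]

-- B's step reads slices of the full pk; they are takes of the suffix
theorem pvStepB_drop (pk : List Char) (i : Nat) :
    pvStepB pk i =
    ([4,3,2,1].findSome? (fun k =>
      if k ≤ (pk.drop i).length && pvPatterns.contains ((pk.drop i).take k) then some k else none)) := by
  unfold pvStepB
  congr 1
  funext k
  rw [show ((i + k : Nat) : Int) = (i : Int) + (k : Int) by push_cast; ring,
      PySem.List.slice_natCast_add]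
  by_cases hc : i + k ≤ pk.length
  · have hc' : k ≤ pk.length - i := by omega
    simp [hc, hc']
  · simp [hc]
    intro hk
    have hk0 : k = 0 := by omega
    subst hk0
    simp [pvPatterns]

-- main loop invariant: B at cursor i computes what A computes on the suffixes
theorem pvLoop_eq (l : List String) (pk : List Char) (hvc : ∀ c ∈ pk, c = 'V' ∨ c = 'C') :
    ∀ n i, pk.length - i ≤ n → pvLoopB l pk i = pvLoopA (l.drop i) (pk.drop i) := by
  intro n
  induction n with
  | zero =>
    intro i hn
    rw [pvLoopB, pvLoopA]
    have h1 : ¬ i < pk.length := by omega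
    have h2 : pk.drop i = [] := by
      apply List.eq_nil_of_length_eq_zero; simp; omega
    simp [h1, h2]
  | succ n ih =>
    intro i hn
    rw [pvLoopB, pvLoopA]
    by_cases hi : i < pk.length
    · have hne : ¬ pk.drop i = [] := by
        intro h; have := congrArg List.length h; simp at this; omega
      have hvc' : ∀ c ∈ pk.drop i, c = 'V' ∨ c = 'C' :=
        fun c hc => hvc c (List.mem_of_mem_drop hc)
      have hstep : pvStepB pk i = (if pvEndA (pk.drop i) = 0 then none else some (pvEndA (pk.drop i))) := by
        rw [pvStepB_drop]; exact pvStep_eq _ hvc'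
      rw [dif_pos hi, dif_neg hne]
      by_cases he : pvEndA (pk.drop i) = 0
      · have hsnone : pvStepB pk i = none := by rw [hstep]; simp [he]
        rw [dif_pos he]
        split
        · rfl
        · rename_i k hs; rw [hsnone] at hs; cases hs
      · have hssome : pvStepB pk i = some (pvEndA (pk.drop i)) := by rw [hstep]; simp [he]
        rw [dif_neg he]
        split
        · rename_i hs; rw [hssome] at hs; cases hs
        · rename_i k hs
          rw [hssome] at hs
          obtain rfl : pvEndA (pk.drop i) = k := by injection hs
          rw [ih (i + pvEndA (pk.drop i)) (by omega)]
          rw [show ((i + pvEndA (pk.drop i) : Nat) : Int) =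
                (i : Int) + ((pvEndA (pk.drop i) : Nat) : Int) by push_cast; ring]
          rw [PySem.List.slice_natCast_add, PySem.List.slice_from_natCast,
              PySem.List.slice_from_natCast, PySem.List.slice_zero_start,
              PySem.List.slice_to_natCast, List.drop_drop, List.drop_drop]
    · have h2 : pk.drop i = [] := by
        apply List.eq_nil_of_length_eq_zero; simp; omega
      rw [dif_pos h2]
      simp [hi]

-- ===== VERDICT (by name: the statement is the Claim_ definition above) =====
theorem phoneme_syllables_spec : Claim_equal_phoneme_syllables := by
  intro l _
  unfold Spec_phoneme_syllables phoneme_syllables phoneme_syllables_alt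
  rw [pvLoop_eq l (pvPK l) (pvPK_VC l) (pvPK l).length 0 (by omega)]
  simp
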